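-- pv_equiv track=rewrite | github.com/catskillsresearch/openasr20 | trim_to_repeat.py | trim_to_repeat
-- ===== SOURCE A (Python) =====
-- def trim_to_repeat(S):
--     n=len(S)
--     max_window = n//2
--     for window in range(1,max_window+1):
--         for i in range(n-window):
--             left=S[i:i+window]
--             right=S[i+window:i+2*window]
--             if left==right:
--                 return S[0:i+window]
--             if len(S[i]) > 20:   # Really should be language specific longest word size
--                 return S[0:i]    # Skip super long word
--     return S
-- ===== SOURCE B (Python) =====
-- def trim_to_repeat(S):
--     n = len(S)
--     # pass 1 (block size 1): first adjacent duplicate word or over-long word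
--     for i in range(n - 1):
--         if S[i] == S[i + 1]:
--             return S[:i + 1]
--         if len(S[i]) > 20:
--             return S[:i]
--     # larger blocks: sliding-window count of positionwise matches S[j] == S[j+w]
--     for w in range(2, n // 2 + 1):
--         m = [S[j] == S[j + w] for j in range(n - w)]
--         good = sum(m[:w])
--         for i in range(n - 2 * w + 1):
--             if good == w:
--                 return S[:i + w]
--             if i + 2 * w < n:
--                 good += int(m[i + w]) - int(m[i])
--     return S
-- ===== Notes on version B (the rewrite author's own statement) =====
-- stated objective: alternative
-- what changed: B replaces A's per-position slice comparisons with, per window size, a precomputed positionwise-match array and a sliding-window running count of matches (plus a specialized window-1 first pass), keeping A's (window, i) search order.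
import Mathlib
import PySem

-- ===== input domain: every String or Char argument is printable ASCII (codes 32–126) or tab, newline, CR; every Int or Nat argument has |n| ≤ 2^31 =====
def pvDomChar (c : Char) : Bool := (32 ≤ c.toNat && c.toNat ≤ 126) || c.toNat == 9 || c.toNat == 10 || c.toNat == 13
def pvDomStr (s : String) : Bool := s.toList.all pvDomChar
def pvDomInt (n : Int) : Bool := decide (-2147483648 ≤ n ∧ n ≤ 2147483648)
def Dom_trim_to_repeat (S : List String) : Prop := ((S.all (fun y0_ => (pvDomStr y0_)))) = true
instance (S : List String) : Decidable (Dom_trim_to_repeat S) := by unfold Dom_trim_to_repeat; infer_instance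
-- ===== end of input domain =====

-- B replaces A's repeated slice comparisons by a per-window sliding count of
-- positionwise matches (with a specialized window-1 first pass); same search order, same result.

-- ===== PORT A =====
def pvA_body (S : List String) (w : Int) (acc : Option (List String)) (i : Int) : Option (List String) :=
  match acc with
  | some r => some r
  | none =>
    let left := PySem.List.slice S (some i) (some (i + w))
    let right := PySem.List.slice S (some (i + w)) (some (i + 2 * w))
    if left == right then some (PySem.List.slice S (some 0) (some (i + w)))
    else if PySem.Str.len (PySem.List.pyGetD S i "") > 20 then
      some (PySem.List.slice S (some 0) (some i))
    else none

def pvA_win (S : List String) (n : Int) (acc : Option (List String)) (w : Int) : Option (List String) :=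
  match acc with
  | some r => some r
  | none => (PySem.List.pyRange 0 (n - w) 1).foldl (pvA_body S w) none

def trim_to_repeat (S : List String) : List String :=
  let n : Int := S.length
  let max_window := PySem.Int.floordiv n 2
  ((PySem.List.pyRange 1 (max_window + 1) 1).foldl (pvA_win S n) none).getD S

-- ===== PORT B =====
def pvB1_body (S : List String) (acc : Option (List String)) (i : Int) : Option (List String) :=
  match acc with
  | some r => some r
  | none =>
    if PySem.List.pyGetD S i "" == PySem.List.pyGetD S (i + 1) "" then
      some (PySem.List.slice S (some 0) (some (i + 1)))
    else if PySem.Str.len (PySem.List.pyGetD S i "") > 20 then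
      some (PySem.List.slice S (some 0) (some i))
    else none

def pvB_slide (S : List String) (n w : Int) (m : List Bool)
    (st : Option (List String) × Int) (i : Int) : Option (List String) × Int :=
  match st with
  | (some r, g) => (some r, g)
  | (none, g) =>
    if g == w then (some (PySem.List.slice S (some 0) (some (i + w))), g)
    else if i + 2 * w < n then
      (none, g + (if PySem.List.pyGetD m (i + w) false = true then (1 : Int) else 0)
               - (if PySem.List.pyGetD m i false = true then (1 : Int) else 0))
    else (none, g)

def pvB_win (S : List String) (n : Int) (acc : Option (List String)) (w : Int) : Option (List String) :=
  match acc with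
  | some r => some r
  | none =>
    let m := (PySem.List.pyRange 0 (n - w) 1).map
      (fun j => PySem.List.pyGetD S j "" == PySem.List.pyGetD S (j + w) "")
    let good0 : Int :=
      ((PySem.List.slice m none (some w)).map (fun b => if b = true then (1 : Int) else 0)).sum
    ((PySem.List.pyRange 0 (n - 2 * w + 1) 1).foldl (pvB_slide S n w m) (none, good0)).1

def trim_to_repeat_alt (S : List String) : List String :=
  let n : Int := S.length
  match (PySem.List.pyRange 0 (n - 1) 1).foldl (pvB1_body S) none with
  | some r => r
  | none =>
    ((PySem.List.pyRange 2 (PySem.Int.floordiv n 2 + 1) 1).foldl (pvB_win S n) none).getD S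

-- ===== PRECONDITION & SPEC =====
def Spec_trim_to_repeat (S : List String) (out : List String) : Prop := out = trim_to_repeat_alt S
instance (S : List String) (out : List String) : Decidable (Spec_trim_to_repeat S out) := by unfold Spec_trim_to_repeat; infer_instance

-- ===== CLAIM (what is proved, stated in full; the proofs are below) =====
def Claim_equal_trim_to_repeat : Prop := ∀ (S : List String), Dom_trim_to_repeat S → Spec_trim_to_repeat S (trim_to_repeat S)

-- ===== LEMMAS AND PROOFS =====

-- a short-circuit Option fold stays at `some r`
theorem pvScSome {α β : Type} (f : Option β → α → Option β)
    (hf : ∀ r x, f (some r) x = some r) (l : List α) (r : β) :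
    l.foldl f (some r) = some r := by
  induction l with
  | nil => rfl
  | cons a t ih => simp [List.foldl, hf, ih]

-- a short-circuit fold that ends at `none` returned `none` at every step
theorem pvScNone {α β : Type} (f : Option β → α → Option β)
    (hf : ∀ r x, f (some r) x = some r) (l : List α)
    (h : l.foldl f none = none) : ∀ x ∈ l, f none x = none := by
  induction l with
  | nil => simp
  | cons a t ih =>
    intro x hx
    simp only [List.foldl] at h
    cases ha : f none a with
    | some r => rw [ha, pvScSome f hf] at h; exact absurd h (by simp)
    | none =>
      rw [ha] at h
      rcases List.mem_cons.mp hx with rfl | hx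
      · exact ha
      · exact ih h x hx

-- converse: every step `none` means the fold is `none`
theorem pvScNone' {α β : Type} (f : Option β → α → Option β) (l : List α)
    (h : ∀ x ∈ l, f none x = none) : l.foldl f none = none := by
  induction l with
  | nil => rfl
  | cons a t ih =>
    simp only [List.foldl, h a (by simp)]
    exact ih (fun x hx => h x (List.mem_cons.mpr (Or.inr hx)))

-- a pair-state short-circuit fold stays at `(some r, g)`
theorem pvScSomePair {α β : Type} (f : Option β × Int → α → Option β × Int)
    (hf : ∀ r g x, f (some r, g) x = (some r, g)) (l : List α) (r : β) (g : Int) :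
    l.foldl f (some r, g) = (some r, g) := by
  induction l with
  | nil => rfl
  | cons a t ih => simp [List.foldl, hf, ih]

theorem pvA_body_some (S : List String) (w : Int) (r : List String) (i : Int) :
    pvA_body S w (some r) i = some r := rfl
theorem pvA_win_some (S : List String) (n : Int) (r : List String) (w : Int) :
    pvA_win S n (some r) w = some r := rfl
theorem pvB1_body_some (S : List String) (r : List String) (i : Int) :
    pvB1_body S (some r) i = some r := rfl
theorem pvB_slide_some (S : List String) (n w : Int) (m : List Bool) (r : List String) (g : Int) (i : Int) :
    pvB_slide S n w m (some r, g) i = (some r, g) := rfl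

-- S[i:i+1] is the singleton [S[i]]
theorem pvSliceSingleton (S : List String) (i : Int) (h0 : 0 ≤ i) (h1 : i < (S.length : Int)) :
    PySem.List.slice S (some i) (some (i + 1)) = [PySem.List.pyGetD S i ""] := by
  rw [PySem.List.slice_toNat S h0 (by omega), PySem.List.pyGetD_eq_getElem S "" h0 h1]
  have hlt : i.toNat < S.length := by omega
  have h2 : (i + 1).toNat - i.toNat = 1 := by omega
  rw [h2, List.drop_eq_getElem_cons hlt, List.take_succ_cons, List.take_zero]

-- A's window-1 body is B's pass-1 body
theorem pvW1Body (S : List String) (acc : Option (List String)) (i : Int)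
    (h0 : 0 ≤ i) (h1 : i < (S.length : Int) - 1) :
    pvA_body S 1 acc i = pvB1_body S acc i := by
  cases acc with
  | some r => rfl
  | none =>
    simp only [pvA_body, pvB1_body]
    have h3 : PySem.List.slice S (some (i+1)) (some (i+2)) = [PySem.List.pyGetD S (i+1) ""] := by
      have h4 := pvSliceSingleton S (i+1) (by omega) (by omega)
      rw [show i+1+1 = i+2 by ring] at h4
      exact h4
    simp only [pvSliceSingleton S i h0 (by omega), mul_one, h3]
    have hbeq : (([PySem.List.pyGetD S i ""] : List String) == [PySem.List.pyGetD S (i+1) ""])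
        = (PySem.List.pyGetD S i "" == PySem.List.pyGetD S (i+1) "") := by
      cases h : PySem.List.pyGetD S i "" == PySem.List.pyGetD S (i+1) "" <;> simp_all
    rw [hbeq]

-- match count for window w starting at i (proof-side only)
def pvCnt (S : List String) (w i : Int) : Int :=
  ((PySem.List.pyRange i (i + w) 1).map
    (fun k => if (PySem.List.pyGetD S k "" == PySem.List.pyGetD S (k + w) "") = true then (1 : Int) else 0)).sum

-- slice equality ↔ full match count
theorem pvCntSlice (S : List String) (w i : Int) (hw : 1 ≤ w) (h0 : 0 ≤ i)
    (h2 : i + 2 * w ≤ (S.length : Int)) :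
    (PySem.List.slice S (some i) (some (i + w)) == PySem.List.slice S (some (i + w)) (some (i + 2 * w))) = true
      ↔ pvCnt S w i = w := by
  have hsum := PySem.List.sum_map_ite_one_zero
    (fun k => PySem.List.pyGetD S k "" == PySem.List.pyGetD S (k + w) "")
    (PySem.List.pyRange i (i + w) 1)
  rw [beq_iff_eq]
  unfold pvCnt
  rw [hsum]
  have hlen : (PySem.List.pyRange i (i + w) 1).length = w.toNat := by
    rw [PySem.List.length_pyRange_one]; omega
  constructor
  · intro h
    have hall : ∀ k ∈ PySem.List.pyRange i (i + w) 1,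
        (PySem.List.pyGetD S k "" == PySem.List.pyGetD S (k + w) "") = true := by
      intro k hk
      rw [PySem.List.mem_pyRange_one] at hk
      rw [beq_iff_eq, PySem.List.pyGetD_eq_getElem S "" (by omega) (by omega),
          PySem.List.pyGetD_eq_getElem S "" (by omega) (by omega)]
      rw [PySem.List.slice_toNat S h0 (by omega), PySem.List.slice_toNat S (by omega) (by omega)] at h
      have hk1 : k.toNat - i.toNat < (i+w).toNat - i.toNat := by omega
      have hq := congrArg (fun l => l[k.toNat - i.toNat]?) h
      simp only [List.getElem?_take, List.getElem?_drop] at hq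
      rw [if_pos hk1, if_pos (by omega)] at hq
      have e1 : i.toNat + (k.toNat - i.toNat) = k.toNat := by omega
      have e2 : (i+w).toNat + (k.toNat - i.toNat) = (k+w).toNat := by omega
      rw [e1, e2] at hq
      have hk2 : k.toNat < S.length := by omega
      have hk3 : (k+w).toNat < S.length := by omega
      rw [List.getElem?_eq_getElem hk2, List.getElem?_eq_getElem hk3] at hq
      exact Option.some.inj hq
    rw [List.countP_eq_length.mpr hall, hlen]; omega
  · intro h
    have hall : ∀ k ∈ PySem.List.pyRange i (i + w) 1,
        (PySem.List.pyGetD S k "" == PySem.List.pyGetD S (k + w) "") = true := by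
      apply List.countP_eq_length.mp
      omega
    rw [PySem.List.slice_toNat S h0 (by omega), PySem.List.slice_toNat S (by omega) (by omega)]
    apply List.ext_getElem
    · simp; omega
    · intro j hj1 hj2
      simp only [List.getElem_take, List.getElem_drop]
      have hjw : j < w.toNat := by simp at hj1; omega
      have hp := hall (i + j) (by rw [PySem.List.mem_pyRange_one]; omega)
      rw [beq_iff_eq, PySem.List.pyGetD_eq_getElem S "" (by omega) (by omega),
          PySem.List.pyGetD_eq_getElem S "" (by omega) (by omega)] at hp
      have e1 : (i + ↑j).toNat = i.toNat + j := by omega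
      have e2 : (i + ↑j + w).toNat = (i + w).toNat + j := by omega
      simp only [e1, e2] at hp
      exact hp

-- sliding update of the count
theorem pvCntStep (S : List String) (w i : Int) (hw : 1 ≤ w) :
    pvCnt S w (i + 1) = pvCnt S w i
      + (if (PySem.List.pyGetD S (i + w) "" == PySem.List.pyGetD S (i + w + w) "") = true then (1 : Int) else 0)
      - (if (PySem.List.pyGetD S i "" == PySem.List.pyGetD S (i + w) "") = true then (1 : Int) else 0) := by
  unfold pvCnt
  rw [PySem.List.pyRange_one_cons (show i < i + w by omega)]
  rw [show i + 1 + w = (i + w) + 1 by ring]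
  rw [PySem.List.pyRange_one_succ_right (show i + 1 ≤ i + w by omega)]
  simp [List.sum_append]
  ring

-- A's body is `none` when the right block is short (given no over-long word)
theorem pvTailNone (S : List String) (w i : Int) (hw : 1 ≤ w) (h0 : 0 ≤ i)
    (hlong : ¬ (20 : Int) < PySem.Str.len (PySem.List.pyGetD S i ""))
    (hlo : (S.length : Int) - 2 * w < i) (hhi : i < (S.length : Int) - w) :
    pvA_body S w none i = none := by
  have hne : (PySem.List.slice S (some i) (some (i + w)) == PySem.List.slice S (some (i + w)) (some (i + 2 * w))) = false := by
    rw [beq_eq_false_iff_ne]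
    intro h
    have hq := congrArg List.length h
    rw [PySem.List.slice_toNat S h0 (by omega), PySem.List.slice_toNat S (by omega) (by omega)] at hq
    simp only [List.length_take, List.length_drop] at hq
    omega
  simp only [pvA_body, hne, Bool.false_eq_true, if_false, if_neg hlong, gt_iff_lt]

-- the per-window equivalence, by downward induction on the remaining range
theorem pvInv (S : List String) (w : Int) (hw : 2 ≤ w) (h2w : 2 * w ≤ (S.length : Int))
    (hlong : ∀ i : Int, 0 ≤ i → i < (S.length : Int) - 1 →
      ¬ (20 : Int) < PySem.Str.len (PySem.List.pyGetD S i "")) :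
    ∀ (d : Nat) (i : Int), 0 ≤ i → i ≤ (S.length : Int) - 2 * w + 1 →
      ((S.length : Int) - 2 * w + 1 - i).toNat = d →
      ((PySem.List.pyRange i ((S.length : Int) - 2 * w + 1) 1).foldl
          (pvB_slide S (S.length : Int) w
            ((PySem.List.pyRange 0 ((S.length : Int) - w) 1).map
              (fun j => PySem.List.pyGetD S j "" == PySem.List.pyGetD S (j + w) "")))
          (none, pvCnt S w i)).1
      = (PySem.List.pyRange i ((S.length : Int) - 2 * w + 1) 1).foldl (pvA_body S w) none := by
  intro d
  induction d with
  | zero =>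
    intro i h0 hle hd
    have : (S.length : Int) - 2 * w + 1 ≤ i := by omega
    rw [PySem.List.pyRange_one_eq_nil this]
    rfl
  | succ d ih =>
    intro i h0 hle hd
    have hilt : i < (S.length : Int) - 2 * w + 1 := by omega
    rw [PySem.List.pyRange_one_cons hilt]
    simp only [List.foldl]
    have hm : ∀ k : Int, 0 ≤ k → k < (S.length : Int) - w →
        PySem.List.pyGetD ((PySem.List.pyRange 0 ((S.length : Int) - w) 1).map
          (fun j => PySem.List.pyGetD S j "" == PySem.List.pyGetD S (j + w) "")) k false
        = (PySem.List.pyGetD S k "" == PySem.List.pyGetD S (k + w) "") := by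
      intro k hk0 hk1
      exact PySem.List.pyGetD_map_pyRange_of_nonneg _ _ _ _ hk0 hk1
    by_cases hc : pvCnt S w i = w
    · -- repeated block found at i
      have hsl := (pvCntSlice S w i (by omega) h0 (by omega)).mpr hc
      have hA : pvA_body S w none i = some (PySem.List.slice S (some 0) (some (i + w))) := by
        simp only [pvA_body, hsl, if_true]
      have hB : pvB_slide S (S.length : Int) w ((PySem.List.pyRange 0 ((S.length : Int) - w) 1).map
            (fun j => PySem.List.pyGetD S j "" == PySem.List.pyGetD S (j + w) "")) (none, pvCnt S w i) i
          = (some (PySem.List.slice S (some 0) (some (i + w))), pvCnt S w i) := by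
        simp [pvB_slide, hc]
      rw [hA, hB]
      rw [pvScSome (pvA_body S w) (pvA_body_some S w) _ _,
          pvScSomePair (pvB_slide S (S.length : Int) w ((PySem.List.pyRange 0 ((S.length : Int) - w) 1).map
            (fun j => PySem.List.pyGetD S j "" == PySem.List.pyGetD S (j + w) ""))) (pvB_slide_some S (S.length : Int) w ((PySem.List.pyRange 0 ((S.length : Int) - w) 1).map
            (fun j => PySem.List.pyGetD S j "" == PySem.List.pyGetD S (j + w) ""))) _ _ _]
    · -- no match here: step both folds
      have hsl := (pvCntSlice S w i (by omega) h0 (by omega))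
      have hslf : (PySem.List.slice S (some i) (some (i + w))
          == PySem.List.slice S (some (i + w)) (some (i + 2 * w))) = false := by
        cases hq : (PySem.List.slice S (some i) (some (i + w))
            == PySem.List.slice S (some (i + w)) (some (i + 2 * w))) with
        | true => exact absurd (hsl.mp hq) hc
        | false => rfl
      have hA : pvA_body S w none i = none := by
        simp only [pvA_body, hslf, Bool.false_eq_true, if_false, gt_iff_lt,
          if_neg (hlong i h0 (by omega))]
      rw [hA]
      by_cases hin : i + 2 * w < (S.length : Int)
      · have hB : pvB_slide S (S.length : Int) w ((PySem.List.pyRange 0 ((S.length : Int) - w) 1).map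
            (fun j => PySem.List.pyGetD S j "" == PySem.List.pyGetD S (j + w) "")) (none, pvCnt S w i) i
            = (none, pvCnt S w (i + 1)) := by
          rw [pvCntStep S w i (by omega)]
          simp only [pvB_slide, beq_iff_eq, if_neg hc, if_pos hin,
            hm i h0 (by omega), hm (i + w) (by omega) (by omega)]
        rw [hB]
        exact ih (i + 1) (by omega) (by omega) (by omega)
      · -- i is the last position: the rest of the range is empty
        have hiw : i = (S.length : Int) - 2 * w := by omega
        have hnil : PySem.List.pyRange (i + 1) ((S.length : Int) - 2 * w + 1) 1 = [] :=
          PySem.List.pyRange_one_eq_nil (by omega)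
        have hB : pvB_slide S (S.length : Int) w ((PySem.List.pyRange 0 ((S.length : Int) - w) 1).map
            (fun j => PySem.List.pyGetD S j "" == PySem.List.pyGetD S (j + w) "")) (none, pvCnt S w i) i
            = (none, pvCnt S w i) := by
          simp only [pvB_slide, beq_iff_eq, if_neg hc, if_neg hin]
        rw [hB, hnil]
        rfl

-- per-window: A's scan equals B's sliding-window scan
theorem pvWinEq (S : List String) (w : Int) (hw : 2 ≤ w) (h2w : 2 * w ≤ (S.length : Int))
    (hlong : ∀ i : Int, 0 ≤ i → i < (S.length : Int) - 1 →
      ¬ (20 : Int) < PySem.Str.len (PySem.List.pyGetD S i "")) :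
    pvA_win S (S.length : Int) none w = pvB_win S (S.length : Int) none w := by
  have hgood :
      ((PySem.List.slice ((PySem.List.pyRange 0 ((S.length : Int) - w) 1).map
          (fun j => PySem.List.pyGetD S j "" == PySem.List.pyGetD S (j + w) "")) none (some w)).map
        (fun b => if b = true then (1 : Int) else 0)).sum = pvCnt S w 0 := by
    rw [PySem.List.slice_to _ (by omega)]
    rw [← List.map_take]
    rw [PySem.List.pyRange_one_append 0 w ((S.length : Int) - w) (by omega) (by omega)]
    rw [List.take_left' (by rw [PySem.List.length_pyRange_one]; omega)]
    unfold pvCnt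
    rw [List.map_map, zero_add]
    rfl
  have hmain := pvInv S w hw h2w hlong ((S.length : Int) - 2 * w + 1).toNat 0 le_rfl (by omega) (by omega)
  simp only [pvA_win, pvB_win, hgood, hmain]
  rw [PySem.List.pyRange_one_append 0 ((S.length : Int) - 2 * w + 1) ((S.length : Int) - w) (by omega) (by omega),
      List.foldl_append]
  cases hr : (PySem.List.pyRange 0 ((S.length : Int) - 2 * w + 1) 1).foldl (pvA_body S w) none with
  | some r => rw [pvScSome (pvA_body S w) (pvA_body_some S w)]
  | none =>
    apply pvScNone'
    intro x hx
    rw [PySem.List.mem_pyRange_one] at hx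
    exact pvTailNone S w x (by omega) (by omega) (hlong x (by omega) (by omega)) (by omega) (by omega)

-- ===== VERDICT (by name: the statement is the Claim_ definition above) =====
-- extraction: pass 1 returning `none` means no over-long word at any position < n-1
theorem pvNoLong (S : List String)
    (h : (PySem.List.pyRange 0 ((S.length : Int) - 1) 1).foldl (pvB1_body S) none = none) :
    ∀ i : Int, 0 ≤ i → i < (S.length : Int) - 1 →
      ¬ (20 : Int) < PySem.Str.len (PySem.List.pyGetD S i "") := by
  intro i h0 h1
  have hi := pvScNone (pvB1_body S) (pvB1_body_some S) _ h i
    (by rw [PySem.List.mem_pyRange_one]; exact ⟨h0, h1⟩)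
  intro hgt
  rw [pvB1_body] at hi
  split_ifs at hi

theorem trim_to_repeat_spec : Claim_equal_trim_to_repeat := by
  intro S _
  show trim_to_repeat S = trim_to_repeat_alt S
  show ((PySem.List.pyRange 1 (PySem.Int.floordiv (S.length : Int) 2 + 1) 1).foldl
      (pvA_win S (S.length : Int)) none).getD S
    = (match (PySem.List.pyRange 0 ((S.length : Int) - 1) 1).foldl (pvB1_body S) none with
      | some r => r
      | none => ((PySem.List.pyRange 2 (PySem.Int.floordiv (S.length : Int) 2 + 1) 1).foldl
          (pvB_win S (S.length : Int)) none).getD S)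
  have hfd : PySem.Int.floordiv (S.length : Int) 2 = (S.length : Int) / 2 :=
    PySem.Int.floordiv_eq_ediv_of_pos (by omega)
  by_cases hn : (S.length : Int) < 2
  · -- too short: every range is empty, both sides return S
    have hmw : PySem.Int.floordiv (S.length : Int) 2 = 0 := by rw [hfd]; omega
    rw [hmw, PySem.List.pyRange_one_eq_nil (by omega : (0 : Int) + 1 ≤ 1),
        PySem.List.pyRange_one_eq_nil (by omega : (S.length : Int) - 1 ≤ 0),
        PySem.List.pyRange_one_eq_nil (by omega : (0 : Int) + 1 ≤ 2)]
    rfl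
  · have hmw1 : 1 ≤ PySem.Int.floordiv (S.length : Int) 2 := by rw [hfd]; omega
    rw [PySem.List.pyRange_one_cons (by omega : 1 < PySem.Int.floordiv (S.length : Int) 2 + 1)]
    simp only [List.foldl]
    have hstep : pvA_win S (S.length : Int) none 1
        = (PySem.List.pyRange 0 ((S.length : Int) - 1) 1).foldl (pvB1_body S) none := by
      show (PySem.List.pyRange 0 ((S.length : Int) - 1) 1).foldl (pvA_body S 1) none = _
      exact PySem.List.foldl_congr_mem _ _ _ _
        (fun acc x hx => pvW1Body S acc x
          (by rw [PySem.List.mem_pyRange_one] at hx; omega)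
          (by rw [PySem.List.mem_pyRange_one] at hx; omega))
    rw [hstep]
    cases hP : (PySem.List.pyRange 0 ((S.length : Int) - 1) 1).foldl (pvB1_body S) none with
    | some r =>
      rw [pvScSome (pvA_win S (S.length : Int)) (pvA_win_some S (S.length : Int))]
      rfl
    | none =>
      have hlong := pvNoLong S hP
      have hcongr : (PySem.List.pyRange 2 (PySem.Int.floordiv (S.length : Int) 2 + 1) 1).foldl
          (pvA_win S (S.length : Int)) none
        = (PySem.List.pyRange 2 (PySem.Int.floordiv (S.length : Int) 2 + 1) 1).foldl
          (pvB_win S (S.length : Int)) none := by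
        apply PySem.List.foldl_congr_mem
        intro acc x hx
        rw [PySem.List.mem_pyRange_one] at hx
        cases acc with
        | some r => rfl
        | none =>
          exact pvWinEq S x (by omega) (by rw [hfd] at hx; omega)
            hlong
      rw [show (1 : Int) + 1 = 2 from rfl, hcongr]
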